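-- pv_equiv track=rewrite | github.com/heejvely/Algorithm | Excercise/py_file/[1차]비밀지도.py | solution
-- ===== SOURCE A (Python) =====
-- def solution(n, arr1, arr2):
--     answer = []
--     for i, j in zip(arr1, arr2):
--         a = format(i|j, 'b')
--         a = a.rjust(n)
--         a = a.replace('1','#')
--         a = a.replace('0',' ')
--         answer.append(a)
--     return answer
-- ===== SOURCE B (Python) =====
-- def solution(n, arr1, arr2):
--     return [render(i | j).rjust(n) for i, j in zip(arr1, arr2)]
--
-- def render(v):
--     """Binary numeral of v, drawn with '#' for 1-bits and ' ' for 0-bits."""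
--     if v < 0:
--         return '-' + render(-v)
--     if v < 2:
--         return '#' if v else ' '
--     return render(v // 2) + ('#' if v % 2 else ' ')
-- ===== Notes on version B (the rewrite author's own statement) =====
-- stated objective: alternative
-- what changed: B renders each OR'd row with a hand-written recursive divmod base-2 conversion that emits '#'/' ' cells directly (then rjust-pads), instead of A's format()-to-'0'/'1'-string followed by rjust and two replace passes; no intermediate digit string is built.
import Mathlib
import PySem

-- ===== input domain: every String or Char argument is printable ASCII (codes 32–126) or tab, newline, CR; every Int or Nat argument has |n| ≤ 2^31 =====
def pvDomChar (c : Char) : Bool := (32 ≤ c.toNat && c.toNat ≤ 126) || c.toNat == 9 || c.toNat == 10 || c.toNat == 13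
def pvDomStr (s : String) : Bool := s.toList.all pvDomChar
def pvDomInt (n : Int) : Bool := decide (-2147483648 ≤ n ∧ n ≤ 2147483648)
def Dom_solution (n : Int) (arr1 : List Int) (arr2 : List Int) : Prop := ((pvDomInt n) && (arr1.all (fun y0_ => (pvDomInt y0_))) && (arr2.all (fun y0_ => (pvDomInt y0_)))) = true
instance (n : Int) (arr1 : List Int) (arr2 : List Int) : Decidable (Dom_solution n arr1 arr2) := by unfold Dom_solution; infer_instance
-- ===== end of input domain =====

-- B renders each OR'd row by a recursive divmod base-2 conversion emitting '#'/' ' cells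
-- directly (then rjust-pads), instead of A's format/rjust/replace pipeline; equal values proved.

-- ===== PORT A =====
-- str.rjust(w): left-pad with spaces, never truncates; '.toNat' is exact here (no pad when w ≤ len)
def pyRjust (s : String) (w : Int) : String :=
  String.ofList (List.replicate (w - (s.toList.length : Int)).toNat ' ' ++ s.toList)

def solution (n : Int) (arr1 : List Int) (arr2 : List Int) : List String :=
  (arr1.zip arr2).foldl
    (fun answer ij =>
      answer ++ [(
        let a := PySem.Int.toBin (PySem.Int.bor ij.1 ij.2)    -- format(i|j, 'b')
        let a := pyRjust a n
        let a := PySem.Str.replace a "1" "#"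
        let a := PySem.Str.replace a "0" " "
        a)])
    []

-- ===== PORT B =====
-- Source B's render: recursive divmod base-2 conversion ('-' prefix, '#' = 1-bit, ' ' = 0-bit)
def render (v : Int) : List Char :=
  if _h : v < 0 then '-' :: render (-v)
  else if _h2 : v < 2 then [if v ≠ 0 then '#' else ' ']
  else render (PySem.Int.floordiv v 2) ++ [if PySem.Int.mod v 2 ≠ 0 then '#' else ' ']
  termination_by (2 * v.natAbs + (if v < 0 then 1 else 0))
  decreasing_by
  · simp only [Int.natAbs_neg, if_neg (by omega : ¬ (-v < 0)), if_pos _h]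
    omega
  · rw [PySem.Int.floordiv_eq_ediv_of_pos (by omega : (0 : Int) < 2)]
    simp only [if_neg _h, if_neg (by omega : ¬ (v / 2 < 0))]
    omega

def solution_alt (n : Int) (arr1 : List Int) (arr2 : List Int) : List String :=
  (arr1.zip arr2).map (fun ij => pyRjust (String.ofList (render (PySem.Int.bor ij.1 ij.2))) n)

-- ===== PRECONDITION & SPEC =====
def Spec_solution (n : Int) (arr1 : List Int) (arr2 : List Int) (out : List String) : Prop := out = solution_alt n arr1 arr2
instance (n : Int) (arr1 : List Int) (arr2 : List Int) (out : List String) : Decidable (Spec_solution n arr1 arr2 out) := by unfold Spec_solution; infer_instance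

-- ===== CLAIM (what is proved, stated in full; the proofs are below) =====
def Claim_equal_solution : Prop := ∀ (n : Int) (arr1 : List Int) (arr2 : List Int), Dom_solution n arr1 arr2 → Spec_solution n arr1 arr2 (solution n arr1 arr2)


-- ===== LEMMAS AND PROOFS =====

-- single-character str.replace is a character map
theorem replace_go_single (o r : Char) : ∀ (l : List Char) (fuel : Nat) (acc : List Char),
    l.length ≤ fuel →
    PySem.Chars.replace.go [o] [r] fuel l acc
      = acc.reverse ++ l.map (fun c => if c = o then r else c) := by
  intro l
  induction l with
  | nil =>
    intro fuel acc _
    rw [PySem.Chars.replace.go.eq_def]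
    cases fuel <;> simp
  | cons c t ih =>
    intro fuel acc hlen
    cases fuel with
    | zero => simp at hlen
    | succ f =>
      rw [PySem.Chars.replace.go.eq_def]
      simp only [List.isPrefixOf, Bool.and_true, List.length_cons] at *
      by_cases hco : o = c
      · subst hco
        simp only [BEq.rfl, if_pos, List.drop_succ_cons, List.length_nil,
          List.drop_zero, List.reverse_singleton, List.singleton_append]
        rw [ih f (r :: acc) (by omega)]
        simp
      · have hbe : (o == c) = false := by simp [hco]
        simp only [hbe, Bool.false_eq_true, if_false]
        rw [ih f (c :: acc) (by omega)]
        simp [show (if c = o then r else c) = c from if_neg fun h => hco h.symm]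

theorem replace_single (o r : Char) (s : List Char) :
    PySem.Chars.replace s [o] [r] = s.map (fun c => if c = o then r else c) := by
  unfold PySem.Chars.replace
  simp only [List.isEmpty_cons]
  rw [replace_go_single o r s s.length [] le_rfl]
  simp

-- binary digits of a Nat, most significant first (the shape Nat.toDigits 2 produces)
def repC (m : Nat) : List Char :=
  if _h : m < 2 then [Nat.digitChar m] else repC (m / 2) ++ [Nat.digitChar (m % 2)]
  termination_by m
  decreasing_by exact Nat.div_lt_self (by omega) (by omega)

theorem toDigitsCore_two_eq (m : Nat) : ∀ (fuel : Nat) (acc : List Char), m < fuel →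
    Nat.toDigitsCore 2 fuel m acc = repC m ++ acc := by
  induction m using Nat.strong_induction_on with
  | _ m ih =>
    intro fuel acc hfuel
    cases fuel with
    | zero => omega
    | succ f =>
      rw [Nat.toDigitsCore.eq_def]
      simp only []
      by_cases h2 : m < 2
      · have hq : m / 2 = 0 := by omega
        conv_rhs => rw [repC]
        simp [hq, h2, Nat.mod_eq_of_lt h2]
      · have hq0 : ¬ m / 2 = 0 := by omega
        simp only [hq0, if_false]
        rw [ih (m / 2) (Nat.div_lt_self (by omega) (by omega)) f
              (Nat.digitChar (m % 2) :: acc) (by omega)]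
        conv_rhs => rw [repC]
        simp [h2]

theorem toDigits_two_eq (m : Nat) : Nat.toDigits 2 m = repC m := by
  unfold Nat.toDigits
  simpa using toDigitsCore_two_eq m (m + 1) [] (by omega)

-- A's two replaces composed, as one character map
def sub10 (c : Char) : Char :=
  if (if c = '1' then '#' else c) = '0' then ' ' else (if c = '1' then '#' else c)

theorem rowA_chars (n v : Int) :
    (PySem.Str.replace (PySem.Str.replace (pyRjust (PySem.Int.toBin v) n) "1" "#") "0" " ")
      = String.ofList ((List.replicate (n - ((PySem.Int.toBinChars v).length : Int)).toNat ' '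
          ++ PySem.Int.toBinChars v).map sub10) := by
  unfold PySem.Str.replace pyRjust
  simp only [String.toList_ofList, PySem.Int.toList_toBin]
  rw [show ("1" : String).toList = ['1'] from rfl, show ("#" : String).toList = ['#'] from rfl,
      show ("0" : String).toList = ['0'] from rfl, show (" " : String).toList = [' '] from rfl]
  rw [replace_single, replace_single, List.map_map]
  rfl

-- B's renderer agrees with the digit string of a Nat, character-substituted
theorem render_repC (V : Nat) : render (V : Int) = (repC V).map sub10 := by
  induction V using Nat.strong_induction_on with
  | _ V ih =>
    by_cases h2 : V < 2
    · interval_cases V <;> (rw [render, repC]; norm_num) <;> rfl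
    · rw [render, repC]
      have hnneg : ¬ ((V : Int) < 0) := by omega
      have hn2 : ¬ ((V : Int) < 2) := by omega
      have hfd : PySem.Int.floordiv (V : Int) 2 = ((V / 2 : Nat) : Int) := by
        exact_mod_cast PySem.Int.floordiv_natCast V 2
      have hmd : PySem.Int.mod (V : Int) 2 = ((V % 2 : Nat) : Int) := by
        exact_mod_cast PySem.Int.mod_natCast V 2
      rw [dif_neg hnneg, dif_neg hn2, dif_neg h2, hfd, hmd,
          ih (V / 2) (Nat.div_lt_self (by omega) (by omega))]
      rw [List.map_append]
      congr 1
      rcases Nat.mod_two_eq_zero_or_one V with h | h <;> rw [h] <;> norm_num <;> rfl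

theorem render_toBin (v : Int) : render v = (PySem.Int.toBinChars v).map sub10 := by
  by_cases hv : v < 0
  · rw [render, dif_pos hv]
    have hna : -v = ((v.natAbs : Nat) : Int) := by omega
    have htb : PySem.Int.toBinChars v = '-' :: Nat.toDigits 2 v.natAbs := by
      unfold PySem.Int.toBinChars
      simp [hv]
    rw [htb, List.map_cons, show sub10 '-' = '-' from rfl, hna, render_repC,
        toDigits_two_eq]
  · obtain ⟨V, rfl⟩ : ∃ V : Nat, v = (V : Int) := ⟨v.toNat, by omega⟩
    have htb : PySem.Int.toBinChars (V : Int) = Nat.toDigits 2 V := by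
      unfold PySem.Int.toBinChars
      simp [hv]
    rw [htb, toDigits_two_eq, render_repC]

-- the single-row equality
theorem row_eq (n v : Int) :
    (PySem.Str.replace (PySem.Str.replace (pyRjust (PySem.Int.toBin v) n) "1" "#") "0" " ")
      = pyRjust (String.ofList (render v)) n := by
  rw [rowA_chars]
  unfold pyRjust
  rw [String.toList_ofList, render_toBin, List.map_append, List.map_replicate,
      show sub10 ' ' = ' ' from rfl, List.length_map]

theorem foldl_append_map {α β : Type} (f : α → β) :
    ∀ (l : List α) (acc : List β),
      l.foldl (fun a x => a ++ [f x]) acc = acc ++ l.map f := by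
  intro l
  induction l with
  | nil => intro acc; simp
  | cons x t ih => intro acc; simp [ih]

-- ===== VERDICT (by name: the statement is the Claim_ definition above) =====
theorem solution_spec : Claim_equal_solution := by
  intro n arr1 arr2 _
  unfold Spec_solution solution solution_alt
  rw [foldl_append_map, List.nil_append]
  apply List.map_congr_left
  intro ij _
  exact row_eq n (PySem.Int.bor ij.1 ij.2)
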